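-- pv_equiv track=rewrite | github.com/gt-cec/maisr | utility/isr_gamedata_processor.py | search_area_calculator
-- ===== SOURCE A (Python) =====
-- def search_area_calculator(command_history, log_timestamp):
--     search_area = 'auto full'  # Initialize as auto weapon because that's how the AI starts
--
--     for cmd in command_history:
--         if cmd[0] <= log_timestamp:
--             if cmd[1] in ['NW','NE','SW','SE']: search_area = 'manual quadrant'
--             elif cmd[1] == 'autonomous': search_area = 'auto full'
--             elif cmd[1] == 'full': search_area = 'manual full'
--     return search_area
-- ===== SOURCE B (Python) =====
-- def search_area_calculator(command_history, log_timestamp):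
--     modes = {'NW': 'manual quadrant', 'NE': 'manual quadrant',
--              'SW': 'manual quadrant', 'SE': 'manual quadrant',
--              'autonomous': 'auto full', 'full': 'manual full'}
--     for ts, cmd in reversed(command_history):
--         if ts <= log_timestamp and cmd in modes:
--             return modes[cmd]
--     return 'auto full'
-- ===== Notes on version B (the rewrite author's own statement) =====
-- stated objective: alternative
-- what changed: Replaces the forward accumulate-to-end loop with a reverse scan over a command-to-mode dict that returns the mode of the last effective recognized command immediately.
import Mathlib
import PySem

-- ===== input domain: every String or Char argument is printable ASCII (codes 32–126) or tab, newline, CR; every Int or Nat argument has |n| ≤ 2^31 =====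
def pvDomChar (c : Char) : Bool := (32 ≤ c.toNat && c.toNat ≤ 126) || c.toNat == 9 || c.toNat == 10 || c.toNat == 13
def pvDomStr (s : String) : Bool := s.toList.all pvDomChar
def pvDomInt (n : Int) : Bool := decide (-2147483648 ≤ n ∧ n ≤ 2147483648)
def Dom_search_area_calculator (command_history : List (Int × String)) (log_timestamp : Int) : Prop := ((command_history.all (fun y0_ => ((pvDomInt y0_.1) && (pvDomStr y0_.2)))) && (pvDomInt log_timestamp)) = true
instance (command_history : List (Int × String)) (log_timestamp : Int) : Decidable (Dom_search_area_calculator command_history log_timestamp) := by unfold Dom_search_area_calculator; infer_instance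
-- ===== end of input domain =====

-- B replaces A's forward accumulate-to-end loop with a reverse scan that returns
-- the mode of the last effective recognized command immediately (alternative decomposition).


-- ===== PORT A =====
def search_area_calculator (command_history : List (Int × String)) (log_timestamp : Int) : String :=
  command_history.foldl (fun search_area cmd =>
    if cmd.1 ≤ log_timestamp then
      if cmd.2 = "NW" ∨ cmd.2 = "NE" ∨ cmd.2 = "SW" ∨ cmd.2 = "SE" then "manual quadrant"
      else if cmd.2 = "autonomous" then "auto full"
      else if cmd.2 = "full" then "manual full"
      else search_area
    else search_area) "auto full"

-- ===== PORT B =====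
-- the dict of recognized command types, as an association list in insertion order
def saModes : PySem.Dict String String :=
  PySem.Dict.ofList
  [("NW", "manual quadrant"), ("NE", "manual quadrant"),
   ("SW", "manual quadrant"), ("SE", "manual quadrant"),
   ("autonomous", "auto full"), ("full", "manual full")]

-- the reverse scan with early return
def saRevScan (log_timestamp : Int) : List (Int × String) → String
  | [] => "auto full"
  | (ts, cmd) :: rest =>
    if ts ≤ log_timestamp then
      match PySem.Dict.get? saModes cmd with
      | some m => m
      | none => saRevScan log_timestamp rest
    else saRevScan log_timestamp rest

def search_area_calculator_alt (command_history : List (Int × String)) (log_timestamp : Int) : String :=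
  saRevScan log_timestamp command_history.reverse

-- ===== PRECONDITION & SPEC =====
def Spec_search_area_calculator (command_history : List (Int × String)) (log_timestamp : Int) (out : String) : Prop := out = search_area_calculator_alt command_history log_timestamp
instance (command_history : List (Int × String)) (log_timestamp : Int) (out : String) : Decidable (Spec_search_area_calculator command_history log_timestamp out) := by unfold Spec_search_area_calculator; infer_instance

-- ===== CLAIM (what is proved, stated in full; the proofs are below) =====
def Claim_equal_search_area_calculator : Prop := ∀ (command_history : List (Int × String)) (log_timestamp : Int), Dom_search_area_calculator command_history log_timestamp → Spec_search_area_calculator command_history log_timestamp (search_area_calculator command_history log_timestamp)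

-- ===== LEMMAS AND PROOFS =====

-- closed form of the dict lookup
lemma saModes_get (c : String) : PySem.Dict.get? saModes c =
    if c = "NW" ∨ c = "NE" ∨ c = "SW" ∨ c = "SE" then some "manual quadrant"
    else if c = "autonomous" then some "auto full"
    else if c = "full" then some "manual full" else none := by
  have h : saModes = PySem.Dict.mk
      [("NW", "manual quadrant"), ("NE", "manual quadrant"),
       ("SW", "manual quadrant"), ("SE", "manual quadrant"),
       ("autonomous", "auto full"), ("full", "manual full")] := by decide
  rw [h]
  simp only [PySem.Dict.get?_mk_cons, beq_iff_eq]
  by_cases h1 : c = "NW" <;> by_cases h2 : c = "NE" <;> by_cases h3 : c = "SW" <;>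
    by_cases h4 : c = "SE" <;> by_cases h5 : c = "autonomous" <;> by_cases h6 : c = "full" <;>
    simp_all [PySem.Dict.get?, eq_comm]

-- A's fold equals: s if no effective recognized command, else the reverse scan's value
lemma saRevScan_correct (t : Int) (l : List (Int × String)) (s : String) :
    l.foldl (fun search_area cmd =>
      if cmd.1 ≤ t then
        if cmd.2 = "NW" ∨ cmd.2 = "NE" ∨ cmd.2 = "SW" ∨ cmd.2 = "SE" then "manual quadrant"
        else if cmd.2 = "autonomous" then "auto full"
        else if cmd.2 = "full" then "manual full"
        else search_area
      else search_area) s =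
    (if l.all (fun c => decide (¬ (c.1 ≤ t ∧ (PySem.Dict.get? saModes c.2).isSome))) then s
     else saRevScan t l.reverse) := by
  induction l using List.reverseRecOn generalizing s with
  | nil => simp
  | append_singleton l a ih =>
    rcases a with ⟨ts, c⟩
    simp only [List.foldl_append, List.foldl_cons, List.foldl_nil, List.reverse_append,
      List.reverse_cons, List.reverse_nil, List.nil_append, List.cons_append,
      List.all_append, List.all_cons, List.all_nil, Bool.and_true]
    rw [ih, saRevScan]
    by_cases hts : ts ≤ t
    · by_cases hc : c = "NW" ∨ c = "NE" ∨ c = "SW" ∨ c = "SE"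
      · simp [hts, hc, saModes_get]
      · by_cases ha : c = "autonomous"
        · simp [hts, hc, ha, saModes_get]
        · by_cases hf : c = "full"
          · simp [hts, hc, ha, hf, saModes_get]
          · have hn : PySem.Dict.get? saModes c = none := by
              simp [saModes_get, hc, ha, hf]
            have hd : decide (¬ (ts ≤ t ∧ (PySem.Dict.get? saModes c).isSome = true)) = true := by
              simp [hn]
            rw [hd, Bool.and_true]
            simp [hts, hc, ha, hf, hn]
    · have hd : decide (¬ (ts ≤ t ∧ (PySem.Dict.get? saModes c).isSome = true)) = true := by
        simp [hts]
      rw [hd, Bool.and_true]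
      simp [hts]

-- if no command is effective and recognized, the reverse scan returns the default
lemma saRevScan_default (t : Int) (l : List (Int × String))
    (h : l.all (fun c => decide (¬ (c.1 ≤ t ∧ (PySem.Dict.get? saModes c.2).isSome))) = true) :
    saRevScan t l = "auto full" := by
  induction l with
  | nil => rfl
  | cons a rest ih =>
    rcases a with ⟨ts, c⟩
    simp only [List.all_cons, Bool.and_eq_true, decide_eq_true_eq] at h
    obtain ⟨h1, h2⟩ := h
    by_cases hts : ts ≤ t
    · have hn : PySem.Dict.get? saModes c = none := by
        cases hg : PySem.Dict.get? saModes c with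
        | none => rfl
        | some m => exact absurd ⟨hts, by simp [hg]⟩ h1
      simpa [saRevScan, hts, hn] using ih (by simpa using h2)
    · simpa [saRevScan, hts] using ih (by simpa using h2)

-- ===== VERDICT (by name: the statement is the Claim_ definition above) =====
theorem search_area_calculator_spec : Claim_equal_search_area_calculator := by
  intro ch t _
  show _ = _
  unfold search_area_calculator search_area_calculator_alt
  rw [saRevScan_correct]
  split_ifs with h
  · rw [saRevScan_default t ch.reverse (by simpa using h)]
  · rfl
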